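-- pv_equiv track=rewrite | github.com/HyeJuSeon/codingtest-study2 | haechan/1주차-1/AC_5430.py | result_func
-- ===== SOURCE A (Python) =====
-- from collections import deque
--
-- def result_func(p, arr):
--     reverse = 1 # 정방향
--     dq = deque(arr)
--     for function in p:
--         if function == "R":
--             reverse *= -1 # 역방향
--         elif function == "D":
--             if not dq:
--                 return "error"
--             if reverse == 1: # True
--                 dq.popleft()
--             elif reverse == -1: # False
--                 dq.pop()
--
--     # 반환할 떄 배열 순서를 맞춰줘야돼.. !
--     if reverse == -1:
--         dq.reverse()
--     arr_str = str(list(dq))[1:-1].replace(" ", "").split(",")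
--     result = "[" + ",".join(arr_str) + "]"
--     return result
-- ===== SOURCE B (Python) =====
-- def result_func(p, arr):
--     forward = True
--     left = 0
--     right = 0
--     n = len(arr)
--     for c in p:
--         if c == "R":
--             forward = not forward
--         elif c == "D":
--             if left + right == n:
--                 return "error"
--             if forward:
--                 left += 1
--             else:
--                 right += 1
--     res = arr[left:n - right]
--     if not forward:
--         res.reverse()
--     return "[" + ",".join(str(x) for x in res) + "]"
-- ===== Notes on version B (the rewrite author's own statement) =====
-- stated objective: simpler
-- what changed: B never mutates a container: it scans p once keeping a direction flag and two deleted-from-each-end counters, takes one final slice of arr (reversed if the direction ends backward), and formats it directly with ','.join(str(x)) instead of A's deque popping and str(list)/[1:-1]/replace/split round-trip.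
import Mathlib
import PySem

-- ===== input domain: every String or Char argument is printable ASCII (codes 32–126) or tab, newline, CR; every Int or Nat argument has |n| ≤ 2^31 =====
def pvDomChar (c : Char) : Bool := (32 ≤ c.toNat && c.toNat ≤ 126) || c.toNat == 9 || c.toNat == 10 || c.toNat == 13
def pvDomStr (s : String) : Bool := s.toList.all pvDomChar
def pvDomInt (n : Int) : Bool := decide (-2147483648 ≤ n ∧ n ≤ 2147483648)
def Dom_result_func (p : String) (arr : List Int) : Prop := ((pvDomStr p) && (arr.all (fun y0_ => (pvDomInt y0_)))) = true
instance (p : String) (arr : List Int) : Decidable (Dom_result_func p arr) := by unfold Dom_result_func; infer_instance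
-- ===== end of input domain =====

-- B replaces A's deque mutation by two deleted-ends counters with one final slice of arr, and
-- formats the result directly with ",".join(str(x)…) instead of A's str(list)/slice/replace/split detour (objective: simpler).

-- ===== PORT A =====
-- the R/D loop over p; `none` models the early `return "error"` on popping an empty deque
def resultAGo : List Char → Int → List Int → Option (Int × List Int)
  | [], rev, dq => some (rev, dq)
  | c :: cs, rev, dq =>
    if c = 'R' then resultAGo cs (rev * -1) dq
    else if c = 'D' then
      if dq = [] then none
      else if rev = 1 then resultAGo cs rev dq.tail
      else if rev = -1 then resultAGo cs rev dq.dropLast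
      else resultAGo cs rev dq
    else resultAGo cs rev dq

-- str(list(dq)) for a list of ints, hand-ported exactly: "[" + ", "-separated str(x) + "]"
def pyReprIntList (l : List Int) : List Char :=
  '[' :: PySem.Chars.join [',', ' '] (l.map PySem.Int.toChars) ++ [']']

def result_func (p : String) (arr : List Int) : String :=
  match resultAGo p.toList 1 arr with
  | none => "error"
  | some (rev, dq) =>
    let dq2 := if rev = -1 then dq.reverse else dq
    -- arr_str = str(list(dq))[1:-1].replace(" ", "").split(",")
    let arrStr := PySem.Chars.splitOn
        (PySem.Chars.replace (PySem.List.slice (pyReprIntList dq2) (some 1) (some (-1))) [' '] []) [',']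
    -- result = "[" + ",".join(arr_str) + "]"
    String.ofList ('[' :: PySem.Chars.join [','] arrStr ++ [']'])

-- ===== PORT B =====
-- single pass over p keeping (forward, #deleted-from-left, #deleted-from-right); `none` = "error"
def resultBGo : List Char → Bool → Nat → Nat → Nat → Option (Bool × Nat × Nat)
  | [], fwd, left, right, _ => some (fwd, left, right)
  | c :: cs, fwd, left, right, n =>
    if c = 'R' then resultBGo cs (!fwd) left right n
    else if c = 'D' then
      if left + right = n then none
      else if fwd then resultBGo cs fwd (left + 1) right n
      else resultBGo cs fwd left (right + 1) n
    else resultBGo cs fwd left right n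

def result_func_alt (p : String) (arr : List Int) : String :=
  let n := arr.length
  match resultBGo p.toList true 0 0 n with
  | none => "error"
  | some (fwd, left, right) =>
    -- res = arr[left : n - right], reversed if the direction ends backward
    let res := PySem.List.slice arr (some (left : Int)) (some ((n : Int) - (right : Int)))
    let res2 := if fwd then res else res.reverse
    -- "[" + ",".join(str(x) for x in res) + "]"
    String.ofList ('[' :: PySem.Chars.join [','] (res2.map PySem.Int.toChars) ++ [']'])

-- ===== PRECONDITION & SPEC =====
def Spec_result_func (p : String) (arr : List Int) (out : String) : Prop := out = result_func_alt p arr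
instance (p : String) (arr : List Int) (out : String) : Decidable (Spec_result_func p arr out) := by unfold Spec_result_func; infer_instance

-- ===== CLAIM (what is proved, stated in full; the proofs are below) =====
def Claim_equal_result_func : Prop := ∀ (p : String) (arr : List Int), Dom_result_func p arr → Spec_result_func p arr (result_func p arr)

-- ===== LEMMAS AND PROOFS =====

-- str(n) never contains ' ' or ','
lemma digitChar_ne (m : Nat) : Nat.digitChar m ≠ ' ' ∧ Nat.digitChar m ≠ ',' := by
  rcases Nat.lt_or_ge m 16 with h | h
  · interval_cases m <;> exact ⟨by decide, by decide⟩
  · have hne : ∀ k, k < 16 → m ≠ k := by omega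
    simp [Nat.digitChar, hne 0 (by omega), hne 1 (by omega), hne 2 (by omega), hne 3 (by omega),
      hne 4 (by omega), hne 5 (by omega), hne 6 (by omega), hne 7 (by omega), hne 8 (by omega),
      hne 9 (by omega), hne 10 (by omega), hne 11 (by omega), hne 12 (by omega),
      hne 13 (by omega), hne 14 (by omega), hne 15 (by omega)]

lemma toDigitsCore_mem (b : Nat) (f : Nat) : ∀ (n : Nat) (l : List Char) (c : Char),
    c ∈ Nat.toDigitsCore b f n l → c ∈ l ∨ ∃ m, c = Nat.digitChar m := by
  induction f with
  | zero => intro n l c h; simp [Nat.toDigitsCore] at h; exact Or.inl h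
  | succ f ih =>
    intro n l c h
    simp only [Nat.toDigitsCore] at h
    split at h
    · rcases List.mem_cons.mp h with h | h
      · exact Or.inr ⟨n % b, h⟩
      · exact Or.inl h
    · rcases ih _ _ _ h with h | h
      · rcases List.mem_cons.mp h with h | h
        · exact Or.inr ⟨n % b, h⟩
        · exact Or.inl h
      · exact Or.inr h

lemma toChars_no_space_comma (n : Int) : ' ' ∉ PySem.Int.toChars n ∧ ',' ∉ PySem.Int.toChars n := by
  have key0 : ∀ m : Nat, ∀ c ∈ Nat.toDigits 10 m, c ≠ ' ' ∧ c ≠ ',' := by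
    intro m c h
    rcases toDigitsCore_mem 10 (m + 1) m [] c h with h' | ⟨k, hk⟩
    · simp at h'
    · exact hk ▸ digitChar_ne k
  have key : ∀ m : Nat, ' ' ∉ Nat.toDigits 10 m ∧ ',' ∉ Nat.toDigits 10 m := by
    intro m
    exact ⟨fun h => (key0 m _ h).1 rfl, fun h => (key0 m _ h).2 rfl⟩
  unfold PySem.Int.toChars
  split_ifs with h
  · refine ⟨fun hm => ?_, fun hm => ?_⟩ <;> rcases List.mem_cons.mp hm with h' | h'
    · exact absurd h' (by decide)
    · exact (key n.natAbs).1 h'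
    · exact absurd h' (by decide)
    · exact (key n.natAbs).2 h'
  · exact key n.toNat

-- replace(" ", "") is exactly: drop all spaces
lemma replace_go_space (l : List Char) : ∀ (acc : List Char) (fuel : Nat), l.length ≤ fuel →
    PySem.Chars.replace.go [' '] [] fuel l acc = acc.reverse ++ l.filter (fun c => c ≠ ' ') := by
  induction l with
  | nil => intro acc fuel _; cases fuel <;> simp [PySem.Chars.replace.go]
  | cons c t ih =>
    intro acc fuel hf
    cases fuel with
    | zero => simp at hf
    | succ f =>
      rw [PySem.Chars.replace.go]
      rw [show ([' ']).isPrefixOf (c :: t) = (c == ' ') by simp [List.isPrefixOf, eq_comm]]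
      by_cases hc : c = ' '
      · subst hc
        simp only [BEq.rfl, if_pos, List.length_cons, List.length_nil, List.drop_succ_cons,
          List.drop_zero, List.reverse_nil, List.nil_append]
        rw [ih _ _ (by simp at hf; omega)]
        simp
      · rw [if_neg (by simp [hc])]
        rw [ih _ _ (by simp at hf; omega)]
        simp [hc]

lemma replace_space (l : List Char) :
    PySem.Chars.replace l [' '] [] = l.filter (fun c => c ≠ ' ') := by
  rw [PySem.Chars.replace]
  simp only [List.isEmpty_cons, Bool.false_eq_true, if_false]
  exact replace_go_space l [] l.length le_rfl

-- split(",") undoes ",".join on comma-free pieces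
lemma splitOn_go_comma (q : List Char) : ∀ (l' cur : List Char) (acc : List (List Char)) (fuel : Nat),
    ',' ∉ q → (q ++ l').length ≤ fuel →
    PySem.Chars.splitOn.go [','] fuel (q ++ l') cur acc
      = PySem.Chars.splitOn.go [','] (fuel - q.length) l' (q.reverse ++ cur) acc := by
  induction q with
  | nil => intro l' cur acc fuel _ _; simp
  | cons c t ih =>
    intro l' cur acc fuel hq hf
    cases fuel with
    | zero => simp at hf
    | succ f =>
      have hc : c ≠ ',' := fun h => hq (h ▸ List.mem_cons_self ..)
      rw [List.cons_append, PySem.Chars.splitOn.go]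
      rw [show ([',']).isPrefixOf (c :: (t ++ l')) = false by
        simp [List.isPrefixOf]; exact fun h => hc h.symm]
      simp only [Bool.false_eq_true, if_false]
      rw [ih l' (c :: cur) acc f (fun h => hq (List.mem_cons_of_mem _ h)) (by simp at hf ⊢; omega)]
      simp [show f + 1 - (t.length + 1) = f - t.length from by omega]

lemma splitOn_go_join (parts : List (List Char)) : ∀ (acc : List (List Char)) (fuel : Nat),
    (∀ x ∈ parts, ',' ∉ x) → parts ≠ [] →
    (PySem.Chars.join [','] parts).length ≤ fuel →
    PySem.Chars.splitOn.go [','] fuel (PySem.Chars.join [','] parts) [] acc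
      = acc.reverse ++ parts := by
  induction parts with
  | nil => intro _ _ _ hne _; exact absurd rfl hne
  | cons q rest ih =>
    intro acc fuel hp _ hf
    cases rest with
    | nil =>
      rw [PySem.Chars.join_singleton] at hf ⊢
      rw [show q = q ++ ([] : List Char) from (List.append_nil q).symm] at hf ⊢
      rw [splitOn_go_comma q [] [] acc fuel (hp q (by simp)) hf]
      cases (fuel - q.length) <;> simp [PySem.Chars.splitOn.go]
    | cons q2 rest2 =>
      rw [PySem.Chars.join_cons_cons] at hf ⊢
      rw [show q ++ [','] ++ PySem.Chars.join [','] (q2 :: rest2)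
            = q ++ (',' :: PySem.Chars.join [','] (q2 :: rest2)) by simp] at hf ⊢
      rw [splitOn_go_comma q _ [] acc fuel (hp q (by simp)) hf]
      have hlen : q.length + 1 ≤ fuel := by simp at hf; omega
      cases hrem : fuel - q.length with
      | zero => omega
      | succ f2 =>
        rw [PySem.Chars.splitOn.go]
        rw [show ([',']).isPrefixOf (',' :: PySem.Chars.join [','] (q2 :: rest2)) = true by
          simp [List.isPrefixOf]]
        simp only [if_true, List.length_nil, List.drop_zero, List.length_cons,
          List.drop_succ_cons, List.append_nil, List.reverse_reverse]
        rw [ih (q :: acc) f2 (fun x hx => hp x (List.mem_cons_of_mem _ hx)) (by simp)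
          (by simp at hf ⊢; omega)]
        simp

lemma splitOn_join (parts : List (List Char)) (hp : ∀ x ∈ parts, ',' ∉ x) (hne : parts ≠ []) :
    PySem.Chars.splitOn (PySem.Chars.join [','] parts) [','] = parts := by
  rw [PySem.Chars.splitOn]
  exact splitOn_go_join parts [] _ hp hne (by omega)

-- the bracket slice [1:-1]
lemma slice_brackets (m : List Char) :
    PySem.List.slice ('[' :: m ++ [']']) (some 1) (some (-1)) = m := by
  simp [PySem.List.slice, PySem.List.clampIdx]
  rw [if_neg (by omega : ¬((m.length : Int) + 1 < 0))]
  simp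

-- filtering the spaces of ", ".join leaves ",".join
lemma filter_join (strs : List (List Char)) (h : ∀ x ∈ strs, ' ' ∉ x) :
    (PySem.Chars.join [',', ' '] strs).filter (fun c => c ≠ ' ')
      = PySem.Chars.join [','] strs := by
  induction strs with
  | nil => simp [PySem.Chars.join_nil]
  | cons q rest ih =>
    cases rest with
    | nil =>
      simp only [PySem.Chars.join_singleton]
      refine List.filter_eq_self.mpr (fun c hc => ?_)
      simp only [ne_eq, decide_eq_true_eq]
      exact fun h' => (h q (by simp)) (h' ▸ hc)
    | cons q2 rest2 =>
      rw [PySem.Chars.join_cons_cons, PySem.Chars.join_cons_cons]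
      rw [List.filter_append, List.filter_append]
      rw [ih (fun x hx => h x (List.mem_cons_of_mem _ hx))]
      have hq : q.filter (fun c => c ≠ ' ') = q := List.filter_eq_self.mpr (fun c hc => by
        simp only [ne_eq, decide_eq_true_eq]
        exact fun h' => (h q (by simp)) (h' ▸ hc))
      rw [hq]
      rfl

-- A's whole formatting pipeline equals B's direct join
lemma format_eq (l : List Int) :
    PySem.Chars.join [',']
        (PySem.Chars.splitOn
          (PySem.Chars.replace
            (PySem.List.slice (pyReprIntList l) (some 1) (some (-1))) [' '] []) [','])
      = PySem.Chars.join [','] (l.map PySem.Int.toChars) := by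
  have hmem1 : ∀ x ∈ l.map PySem.Int.toChars, ' ' ∉ x := by
    rintro x hx
    rw [List.mem_map] at hx
    obtain ⟨m, _, rfl⟩ := hx
    exact (toChars_no_space_comma m).1
  have hmem2 : ∀ x ∈ l.map PySem.Int.toChars, ',' ∉ x := by
    rintro x hx
    rw [List.mem_map] at hx
    obtain ⟨m, _, rfl⟩ := hx
    exact (toChars_no_space_comma m).2
  rw [pyReprIntList, slice_brackets, replace_space, filter_join _ hmem1]
  cases l with
  | nil => decide
  | cons a t => rw [splitOn_join _ (by simpa using hmem2) (by simp)]

lemma take_drop_nil_iff (arr : List Int) (left right : Nat) (h : left + right ≤ arr.length) :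
    ((arr.drop left).take (arr.length - left - right) = [] ↔ left + right = arr.length) := by
  rw [← List.length_eq_zero_iff, List.length_take, List.length_drop]
  omega

-- the loop invariant: A's deque is always the untouched middle slice of arr
lemma go_eq (arr : List Int) (cs : List Char) : ∀ (fwd : Bool) (left right : Nat),
    left + right ≤ arr.length →
    resultAGo cs (if fwd then 1 else -1) ((arr.drop left).take (arr.length - left - right))
      = (resultBGo cs fwd left right arr.length).map
          (fun s => (if s.1 then 1 else -1, (arr.drop s.2.1).take (arr.length - s.2.1 - s.2.2))) := by
  induction cs with
  | nil => intros; simp [resultAGo, resultBGo]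
  | cons c cs ih =>
    intro fwd left right h
    by_cases hR : c = 'R'
    · subst hR
      simp only [resultAGo, resultBGo]
      have := ih (!fwd) left right h
      cases fwd <;> simpa using this
    · by_cases hD : c = 'D'
      · subst hD
        simp only [resultAGo, resultBGo, if_neg hR]
        by_cases hend : left + right = arr.length
        · rw [if_pos ((take_drop_nil_iff arr left right h).mpr hend), if_pos hend]
          rfl
        · rw [if_neg (fun hx => hend ((take_drop_nil_iff arr left right h).mp hx)), if_neg hend]
          cases fwd with
          | true =>
            rw [if_pos rfl, if_pos rfl]
            have htail : ((arr.drop left).take (arr.length - left - right)).tail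
                = (arr.drop (left + 1)).take (arr.length - (left + 1) - right) := by
              rw [show (((arr.drop left).take (arr.length - left - right)).tail)
                    = ((arr.drop left).take (arr.length - left - right)).drop 1 by
                  cases ((arr.drop left).take (arr.length - left - right)) <;> simp,
                List.drop_take, List.drop_drop]
              congr 1
              omega
            rw [htail]
            exact ih true (left + 1) right (by omega)
          | false =>
            simp only [Bool.false_eq_true, if_false, if_true,
              if_neg (show ¬((-1 : Int) = 1) by norm_num)]
            have hlast : ((arr.drop left).take (arr.length - left - right)).dropLast
                = (arr.drop left).take (arr.length - left - (right + 1)) := by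
              have hk : arr.length - left - right ≤ (arr.drop left).length := by
                rw [List.length_drop]; omega
              rcases lt_or_eq_of_le hk with h' | h'
              · rw [List.dropLast_take h']
                congr 1
              · have h'' := h'
                simp only [List.length_drop] at h''
                rw [h', List.take_length, List.dropLast_eq_take]
                congr 1
                simp only [List.length_drop]
                omega
            rw [hlast]
            exact ih false left (right + 1) (by omega)
      · simp only [resultAGo, resultBGo, if_neg hR, if_neg hD]
        exact ih fwd left right h

-- B's counters never overshoot
lemma resultBGo_le (cs : List Char) : ∀ (fwd : Bool) (left right n : Nat)
    (s : Bool × Nat × Nat), left + right ≤ n →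
    resultBGo cs fwd left right n = some s → s.2.1 + s.2.2 ≤ n := by
  induction cs with
  | nil => intro fwd left right n s h hs; simp [resultBGo] at hs; subst hs; exact h
  | cons c cs ih =>
    intro fwd left right n s h hs
    rw [resultBGo] at hs
    split_ifs at hs with h1 h2 h3 h4
    all_goals first
      | exact Option.noConfusion hs
      | exact ih _ _ _ _ _ (by omega) hs

-- ===== VERDICT (by name: the statement is the Claim_ definition above) =====
theorem result_func_spec : Claim_equal_result_func := by
  intro p arr _
  unfold Spec_result_func result_func result_func_alt
  have hgo := go_eq arr p.toList true 0 0 (by omega)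
  simp only [List.drop_zero, Nat.sub_zero, List.take_length, if_true] at hgo
  cases hB : resultBGo p.toList true 0 0 arr.length with
  | none =>
    rw [hB] at hgo
    simp only [Option.map_none] at hgo
    simp [hgo, hB]
  | some s =>
    obtain ⟨fwd, l, r⟩ := s
    rw [hB] at hgo
    simp only [Option.map_some] at hgo
    have hle : l + r ≤ arr.length := resultBGo_le p.toList true 0 0 arr.length _ (by omega) hB
    have hslice : PySem.List.slice arr (some (l : Int)) (some ((arr.length : Int) - (r : Int)))
        = (arr.drop l).take (arr.length - l - r) := by
      rw [show ((arr.length : Int) - (r : Int)) = ((arr.length - r : Nat) : Int) by omega]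
      rw [PySem.List.slice_natCast]
      congr 1
      omega
    cases fwd with
    | true => simp [hgo, hB, hslice, format_eq]
    | false => simp [hgo, hB, hslice, format_eq]
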